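-- pv_equiv track=rewrite | github.com/N3X15/Avorion-PioneerStarterPack | devtools/build.py | _list_printf_symbols
-- ===== SOURCE A (Python) =====
-- from typing import List, Set
--
-- def _list_printf_symbols(s:str)->List[str]:
--     o:List[str]=[]
--     pct:bool=False
--     waiting:bool=False
--     for c in s:
--         match c:
--             case "%":
--                 if waiting:
--                     pct = False
--                     waiting = False
--                 else:
--                     pct = True
--                     waiting = True
--             case 's':
--                 if waiting and pct:
--                     o.append("s")
--                 pct = False
--                 waiting = False
--             case 'd':
--                 if waiting and pct:
--                     o.append("d")
--                 pct = False
--                 waiting = False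
--             case _:
--                 pct = False
--                 waiting = False
--     return o
-- ===== SOURCE B (Python) =====
-- def _list_printf_symbols(s):
--     out = []
--     i = 0
--     n = len(s)
--     while i < n:
--         if s[i] == '%' and i + 1 < n:
--             c = s[i + 1]
--             if c == '%':
--                 i += 2
--                 continue
--             if c in ('s', 'd'):
--                 out.append(c)
--                 i += 2
--                 continue
--         i += 1
--     return out
-- ===== Notes on version B (the rewrite author's own statement) =====
-- stated objective: simpler
-- what changed: Replaces the char-by-char pct/waiting flag state machine with an index-based token scanner that consumes '%%' and '%s'/'%d' as two-character tokens, carrying no boolean state.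
import Mathlib
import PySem

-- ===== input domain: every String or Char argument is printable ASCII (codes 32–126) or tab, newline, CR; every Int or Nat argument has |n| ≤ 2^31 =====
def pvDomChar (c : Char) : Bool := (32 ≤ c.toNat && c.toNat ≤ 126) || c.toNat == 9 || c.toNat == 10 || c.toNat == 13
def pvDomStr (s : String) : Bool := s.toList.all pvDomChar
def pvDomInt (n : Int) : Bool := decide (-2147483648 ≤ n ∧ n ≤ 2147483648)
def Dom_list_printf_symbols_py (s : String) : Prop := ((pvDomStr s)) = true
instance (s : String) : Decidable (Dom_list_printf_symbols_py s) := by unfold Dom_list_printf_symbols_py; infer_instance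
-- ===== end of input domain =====

-- B replaces A's char-by-char pct/waiting flag machine with a stateless index scanner
-- consuming '%%' and '%s'/'%d' as two-character tokens (objective: simpler); same return value.

-- ===== PORT A =====
-- state = (o, pct, waiting); one step of A's for-loop (match branches in source order)
def pvAStep (st : List String × Bool × Bool) (c : Char) : List String × Bool × Bool :=
  if c = '%' then
    if st.2.2 then (st.1, false, false) else (st.1, true, true)
  else if c = 's' then
    (if st.2.2 && st.2.1 then st.1 ++ ["s"] else st.1, false, false)
  else if c = 'd' then
    (if st.2.2 && st.2.1 then st.1 ++ ["d"] else st.1, false, false)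
  else (st.1, false, false)

def list_printf_symbols_py (s : String) : List String :=
  (s.toList.foldl pvAStep ([], false, false)).1

-- ===== PORT B =====
-- Source B's while loop: at each position, '%'+next char decide a 2-char token or a 1-char skip
def pvBScan : List Char → List String
  | [] => []
  | [_] => []                                 -- last char alone never matches: i += 1, loop ends
  | c :: d :: rest =>
    if c = '%' then
      if d = '%' then pvBScan rest            -- '%%': i += 2
      else if d = 's' then "s" :: pvBScan rest -- '%s': append, i += 2
      else if d = 'd' then "d" :: pvBScan rest -- '%d': append, i += 2
      else pvBScan (d :: rest)                -- '%' + other: i += 1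
    else pvBScan (d :: rest)                  -- other char: i += 1

def list_printf_symbols_py_alt (s : String) : List String :=
  pvBScan s.toList

-- ===== PRECONDITION & SPEC =====
def Spec_list_printf_symbols_py (s : String) (out : List String) : Prop := out = list_printf_symbols_py_alt s
instance (s : String) (out : List String) : Decidable (Spec_list_printf_symbols_py s out) := by unfold Spec_list_printf_symbols_py; infer_instance

-- ===== CLAIM (what is proved, stated in full; the proofs are below) =====
def Claim_equal_list_printf_symbols_py : Prop := ∀ (s : String), Dom_list_printf_symbols_py s → Spec_list_printf_symbols_py s (list_printf_symbols_py s)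

-- ===== LEMMAS AND PROOFS =====

-- A's loop with pct = waiting = w, output accumulator abstracted away
def pvG : List Char → Bool → List String
  | [], _ => []
  | c :: r, w =>
    if c = '%' then pvG r (!w)
    else if c = 's' then (if w then ["s"] else []) ++ pvG r false
    else if c = 'd' then (if w then ["d"] else []) ++ pvG r false
    else pvG r false

-- A's fold, started in a state with pct = waiting = w, appends pvG cs w
lemma pvFoldA (cs : List Char) : ∀ (o : List String) (w : Bool),
    (cs.foldl pvAStep (o, w, w)).1 = o ++ pvG cs w := by
  induction cs with
  | nil => intro o w; simp [pvG]
  | cons c r ih =>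
    intro o w
    by_cases h1 : c = '%'
    · cases w <;> simp [List.foldl, pvAStep, pvG, h1, ih]
    · by_cases h2 : c = 's'
      · cases w <;> simp [List.foldl, pvAStep, pvG, h2, ih]
      · by_cases h3 : c = 'd'
        · cases w <;> simp [List.foldl, pvAStep, pvG, h3, ih]
        · simp [List.foldl, pvAStep, pvG, h1, h2, h3, ih]

-- skipping one non-'%' character changes neither scan
lemma pvG_cons_other (c : Char) (r : List Char) (h : c ≠ '%') : pvG (c :: r) false = pvG r false := by
  simp [pvG, h]

lemma pvBScan_cons_other (c : Char) (l : List Char) (h : c ≠ '%') : pvBScan (c :: l) = pvBScan l := by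
  cases l with
  | nil => simp [pvBScan]
  | cons d r => simp [pvBScan, h]

-- pvG from the initial (non-waiting) state is exactly B's token scan
lemma pvG_eq_bScan : ∀ (n : Nat) (cs : List Char), cs.length ≤ n → pvG cs false = pvBScan cs := by
  intro n
  induction n with
  | zero =>
    intro cs h
    rw [Nat.le_zero, List.length_eq_zero_iff] at h
    subst h; simp [pvG, pvBScan]
  | succ n ih =>
    intro cs h
    match cs with
    | [] => simp [pvG, pvBScan]
    | [c] =>
      by_cases h1 : c = '%' <;> by_cases h2 : c = 's' <;> by_cases h3 : c = 'd' <;>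
        simp_all [pvG, pvBScan]
    | c :: d :: r2 =>
      simp only [List.length_cons] at h
      by_cases h1 : c = '%'
      · subst h1
        by_cases g1 : d = '%'
        · simp [pvG, pvBScan, g1, ih r2 (by omega)]
        · by_cases g2 : d = 's'
          · simp [pvG, pvBScan, g2, ih r2 (by omega)]
          · by_cases g3 : d = 'd'
            · simp [pvG, pvBScan, g3, ih r2 (by omega)]
            · -- '%' then a non-token char: both continue scanning from d
              simp [pvG, pvBScan, g1, g2, g3, pvBScan_cons_other d r2 g1,
                ih r2 (by omega)]
      · rw [pvG_cons_other c (d :: r2) h1, pvBScan_cons_other c (d :: r2) h1]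
        exact ih (d :: r2) (by simp; omega)

-- ===== VERDICT (by name: the statement is the Claim_ definition above) =====
theorem list_printf_symbols_py_spec : Claim_equal_list_printf_symbols_py := by
  intro s _
  show list_printf_symbols_py s = list_printf_symbols_py_alt s
  rw [list_printf_symbols_py, list_printf_symbols_py_alt, pvFoldA, List.nil_append,
    pvG_eq_bScan s.toList.length s.toList le_rfl]
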